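-- pv_equiv track=rewrite | github.com/qml2code/qml2 | qml2/orb_ml/optimize_basis_sets.py | last_contracted_and_uncontracted_orbital_ids
-- ===== SOURCE A (Python) =====
-- def last_contracted_and_uncontracted_orbital_ids(basis_list):
--     encountered_momenta = []
--     last_contracted = []
--     uncontracted = []
--     en_basis_list = list(enumerate(basis_list))
--     for bo_id, bo in en_basis_list[::-1]:
--         if len(bo) == 2:
--             uncontracted.append(bo_id)
--             continue
--         momentum = bo[0]
--         if momentum not in encountered_momenta:
--             encountered_momenta.append(momentum)
--             last_contracted.append(bo_id)
--     return last_contracted, uncontracted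
-- ===== SOURCE B (Python) =====
-- def last_contracted_and_uncontracted_orbital_ids(basis_list):
--     n = len(basis_list)
--     uncontracted = [i for i in range(n - 1, -1, -1) if len(basis_list[i]) == 2]
--     last_index = {bo[0]: bo_id for bo_id, bo in enumerate(basis_list) if len(bo) != 2}
--     return sorted(last_index.values(), reverse=True), uncontracted
-- ===== Notes on version B (the rewrite author's own statement) =====
-- stated objective: idiomatic
-- what changed: Replaces A's backward scan with a seen-momenta list (O(n*k) membership tests) by two staged passes: a descending-range comprehension for the uncontracted ids and a forward dict comprehension keeping each momentum's last index, emitted sorted descending.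
import Mathlib
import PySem

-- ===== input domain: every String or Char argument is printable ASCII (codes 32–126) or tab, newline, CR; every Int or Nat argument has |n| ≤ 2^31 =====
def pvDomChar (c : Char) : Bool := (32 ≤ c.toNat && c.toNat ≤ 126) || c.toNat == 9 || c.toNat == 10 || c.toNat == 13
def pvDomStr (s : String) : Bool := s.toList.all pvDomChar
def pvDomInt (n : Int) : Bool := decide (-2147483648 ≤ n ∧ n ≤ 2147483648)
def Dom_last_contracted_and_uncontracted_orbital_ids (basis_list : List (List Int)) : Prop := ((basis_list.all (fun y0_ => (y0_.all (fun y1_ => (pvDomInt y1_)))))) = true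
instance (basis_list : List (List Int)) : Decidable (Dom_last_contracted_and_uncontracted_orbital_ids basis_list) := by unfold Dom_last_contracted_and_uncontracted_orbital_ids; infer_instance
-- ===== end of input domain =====

-- B replaces A's backward scan with a seen-momenta list by two staged passes: a
-- descending-range comprehension for the uncontracted ids and a forward dict
-- comprehension keeping each momentum's last index, emitted sorted descending (idiomatic rewrite).

-- ===== PORT A =====
def pvAStep (st : List Int × List Int × List Int) (p : Int × List Int) :
    List Int × List Int × List Int :=
  let (enc, lc, unc) := st
  if p.2.length = 2 then (enc, lc, unc ++ [p.1])
  else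
    match PySem.List.pyGet? p.2 0 with
    | none => (enc, lc, unc)  -- bo[0] raises IndexError in Python; excluded by Pre_
    | some momentum =>
        if momentum ∈ enc then (enc, lc, unc)
        else (enc ++ [momentum], lc ++ [p.1], unc)

def last_contracted_and_uncontracted_orbital_ids (basis_list : List (List Int)) :
    List Int × List Int :=
  let en_basis_list := PySem.List.enumerate basis_list
  let r := en_basis_list.reverse.foldl pvAStep ([], [], [])  -- en_basis_list[::-1]
  (r.2.1, r.2.2)

-- ===== PORT B =====
def last_contracted_and_uncontracted_orbital_ids_alt (basis_list : List (List Int)) :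
    List Int × List Int :=
  let n : Int := basis_list.length
  -- [i for i in range(n-1, -1, -1) if len(basis_list[i]) == 2]; indices of the range are in
  -- bounds, so pyGet? is always `some` and the `.getD []` default is never used
  let uncontracted := (PySem.List.pyRange (n - 1) (-1) (-1)).filter
      (fun i => ((PySem.List.pyGet? basis_list i).getD []).length == 2)
  -- {bo[0]: bo_id for bo_id, bo in enumerate(basis_list) if len(bo) != 2};
  -- bo[0] raises IndexError in Python on an empty bo; excluded by Pre_
  let last_index := ((PySem.List.enumerate basis_list).filter (fun p => p.2.length != 2)).foldl
      (fun d p => d.insert ((PySem.List.pyGet? p.2 0).getD 0) p.1) PySem.Dict.empty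
  (PySem.List.sorted last_index.values (fun x => x) true, uncontracted)

-- ===== PRECONDITION & SPEC =====
-- Pre_ excludes exactly the inputs on which the Python A (and B alike) raises IndexError:
-- an orbital whose basis list is empty (len ≠ 2 and no element 0).
def Pre_last_contracted_and_uncontracted_orbital_ids (basis_list : List (List Int)) : Prop :=
  ∀ bo ∈ basis_list, bo.length = 2 ∨ bo ≠ []
instance (basis_list : List (List Int)) : Decidable (Pre_last_contracted_and_uncontracted_orbital_ids basis_list) := by unfold Pre_last_contracted_and_uncontracted_orbital_ids; infer_instance
def pvWitness_last_contracted_and_uncontracted_orbital_ids : List (List Int) :=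
  [[0, 1], [0, 2, 3], [1, 4, 5], [0, 6, 7], [1, 8]]

def Spec_last_contracted_and_uncontracted_orbital_ids (basis_list : List (List Int)) (out : List Int × List Int) : Prop := out = last_contracted_and_uncontracted_orbital_ids_alt basis_list
instance (basis_list : List (List Int)) (out : List Int × List Int) : Decidable (Spec_last_contracted_and_uncontracted_orbital_ids basis_list out) := by unfold Spec_last_contracted_and_uncontracted_orbital_ids; infer_instance

-- ===== CLAIM (what is proved, stated in full; the proofs are below) =====
def Claim_equal_last_contracted_and_uncontracted_orbital_ids : Prop := ∀ (basis_list : List (List Int)), Dom_last_contracted_and_uncontracted_orbital_ids basis_list → Pre_last_contracted_and_uncontracted_orbital_ids basis_list → Spec_last_contracted_and_uncontracted_orbital_ids basis_list (last_contracted_and_uncontracted_orbital_ids basis_list)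

-- ===== LEMMAS AND PROOFS =====

-- (momentum, id) pair of a contracted orbital entry
def pvToKV (p : Int × List Int) : Int × Int := (p.2.headI, p.1)
-- contracted / uncontracted tests
def pvC (p : Int × List Int) : Bool := !(p.2.length == 2)
def pvP (p : Int × List Int) : Bool := p.2.length == 2

-- first-occurrence-per-key scan (A's encountered_momenta filter), seen accumulator
def pvDk (seen : List Int) : List (Int × Int) → List (Int × Int)
  | [] => []
  | p :: q => if p.1 ∈ seen then pvDk seen q else p :: pvDk (seen ++ [p.1]) q

-- dict built by inserting from the back (B's forward insertion, viewed from A's order)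
def pvD (q : List (Int × Int)) : PySem.Dict Int Int :=
  q.foldr (fun p d => d.insert p.1 p.2) PySem.Dict.empty

theorem pvA_decomp (m : List (Int × List Int)) (enc lc unc : List Int)
    (h : ∀ p ∈ m, p.2.length = 2 ∨ p.2 ≠ []) :
    m.foldl pvAStep (enc, lc, unc) =
      (enc ++ (pvDk enc ((m.filter pvC).map pvToKV)).map (·.1),
       lc ++ (pvDk enc ((m.filter pvC).map pvToKV)).map (·.2),
       unc ++ (m.filter pvP).map (·.1)) := by
  induction m generalizing enc lc unc with
  | nil => simp [pvDk]
  | cons p m ih =>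
    have hp := h p (List.mem_cons_self)
    have hm : ∀ q ∈ m, q.2.length = 2 ∨ q.2 ≠ [] := fun q hq => h q (List.mem_cons_of_mem _ hq)
    by_cases h2 : p.2.length = 2
    · simp only [List.foldl_cons, pvAStep, h2, if_pos rfl, List.filter_cons, pvC, pvP, h2]
      simp only [beq_self_eq_true, Bool.not_true, ih _ _ _ hm, List.map_cons, List.append_assoc,
        List.cons_append, List.nil_append, if_pos]
      simp
    · obtain hne := hp.resolve_left h2
      obtain ⟨pid, bo⟩ := p
      obtain ⟨a, t, rfl⟩ := List.exists_cons_of_ne_nil hne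
      simp only [List.foldl_cons, pvAStep, if_neg h2]
      have hg : PySem.List.pyGet? (a :: t) 0 = some a := by
        simp [PySem.List.pyGet?, PySem.List.pyIdx?]
      rw [hg]
      have hC : pvC (pid, a :: t) = true := by simp [pvC] at h2 ⊢; omega
      have hP : pvP (pid, a :: t) = false := by simp [pvP] at h2 ⊢; omega
      have hkv : pvToKV (pid, a :: t) = (a, pid) := by
        simp [pvToKV]
      by_cases hmem : a ∈ enc
      · simp only [if_pos hmem, ih _ _ _ hm, List.filter_cons, hC, hP, if_pos, List.map_cons, hkv]
        simp [pvDk, hmem, hkv]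
      · simp only [if_neg hmem, ih _ _ _ hm, List.filter_cons, hC, hP, List.map_cons, hkv]
        simp [pvDk, hmem, hkv]
  termination_by m.length

theorem pvD_get? (q : List (Int × Int)) (k : Int) :
    (pvD q).get? k = (q.find? (fun p => p.1 == k)).map (·.2) := by
  induction q with
  | nil => simp [pvD, PySem.Dict.get?_empty]
  | cons p q ih =>
    show ((pvD q).insert p.1 p.2).get? k = _
    rw [PySem.Dict.get?_insert]
    by_cases hk : k = p.1
    · simp [hk]
    · have : (p.1 == k) = false := by simp [Ne.symm hk]
      simp [this, hk, ih]

theorem pvD_nodup (q : List (Int × Int)) : (pvD q).keys.Nodup := by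
  induction q with
  | nil => simp [pvD, PySem.Dict.keys_empty]
  | cons p q ih => exact PySem.Dict.nodup_keys_insert _ _ _ ih

theorem pvD_mem_keys (q : List (Int × Int)) (k : Int) :
    k ∈ (pvD q).keys ↔ k ∈ q.map (·.1) := by
  rw [← not_iff_not, ← PySem.Dict.get?_eq_none_iff_not_mem_keys, pvD_get?]
  rw [Option.map_eq_none_iff, List.find?_eq_none]
  constructor
  · intro h hk
    obtain ⟨p, hp, hpk⟩ := List.mem_map.mp hk
    exact (h p hp) (by simpa using hpk)
  · intro h p hp hpk
    exact h (List.mem_map.mpr ⟨p, hp, by simpa using hpk⟩)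

theorem pvDk_not_seen (seen : List Int) (q : List (Int × Int)) (p : Int × Int)
    (h : p ∈ pvDk seen q) : p.1 ∉ seen := by
  induction q generalizing seen with
  | nil => simp [pvDk] at h
  | cons r q ih =>
    simp only [pvDk] at h
    by_cases hr : r.1 ∈ seen
    · exact ih seen (by simpa [hr] using h)
    · rw [if_neg hr] at h
      rcases List.mem_cons.mp h with rfl | h
      · exact hr
      · intro hs
        exact ih (seen ++ [r.1]) h (by simp [hs])

theorem pvDk_find? (seen : List Int) (q : List (Int × Int)) (p : Int × Int)
    (h : p ∈ pvDk seen q) : q.find? (fun r => r.1 == p.1) = some p := by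
  induction q generalizing seen with
  | nil => simp [pvDk] at h
  | cons r q ih =>
    simp only [pvDk] at h
    by_cases hr : r.1 ∈ seen
    · rw [if_pos hr] at h
      have hne : (r.1 == p.1) = false := by
        have := pvDk_not_seen seen q p h
        simp only [beq_eq_false_iff_ne, ne_eq]
        intro e; exact this (e ▸ hr)
      rw [List.find?_cons, hne]
      exact ih seen h
    · rw [if_neg hr] at h
      rcases List.mem_cons.mp h with rfl | h
      · simp
      · have hne : (r.1 == p.1) = false := by
          have := pvDk_not_seen (seen ++ [r.1]) q p h
          simp only [beq_eq_false_iff_ne, ne_eq]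
          intro e; exact this (by simp [← e])
        rw [List.find?_cons, hne]
        exact ih (seen ++ [r.1]) h

theorem pvDk_nodup (seen : List Int) (q : List (Int × Int)) :
    ((pvDk seen q).map (·.1)).Nodup := by
  induction q generalizing seen with
  | nil => simp [pvDk]
  | cons r q ih =>
    simp only [pvDk]
    by_cases hr : r.1 ∈ seen
    · simpa [hr] using ih seen
    · rw [if_neg hr]
      simp only [List.map_cons, List.nodup_cons]
      refine ⟨?_, ih (seen ++ [r.1])⟩
      intro hmem
      obtain ⟨p, hp, hpk⟩ := List.mem_map.mp hmem
      exact (pvDk_not_seen _ _ _ hp) (by simp [hpk])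

theorem pvDk_mem_keys (seen : List Int) (q : List (Int × Int)) (k : Int) :
    k ∈ (pvDk seen q).map (·.1) ↔ k ∈ q.map (·.1) ∧ k ∉ seen := by
  induction q generalizing seen with
  | nil => simp [pvDk]
  | cons r q ih =>
    simp only [pvDk]
    by_cases hr : r.1 ∈ seen
    · rw [if_pos hr, ih]
      simp only [List.map_cons, List.mem_cons]
      constructor
      · rintro ⟨h1, h2⟩; exact ⟨Or.inr h1, h2⟩
      · rintro ⟨h1 | h1, h2⟩
        · exact absurd (h1 ▸ hr) h2
        · exact ⟨h1, h2⟩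
    · rw [if_neg hr]
      simp only [List.map_cons, List.mem_cons, ih]
      constructor
      · rintro (rfl | ⟨h1, h2⟩)
        · exact ⟨Or.inl rfl, hr⟩
        · exact ⟨Or.inr h1, fun hs => h2 (by simp [hs])⟩
      · rintro ⟨rfl | h1, h2⟩
        · exact Or.inl rfl
        · by_cases hk : k = r.1
          · exact Or.inl hk
          · exact Or.inr ⟨h1, by simp [hk, h2]⟩

theorem pvDk_sublist (seen : List Int) (q : List (Int × Int)) : (pvDk seen q).Sublist q := by
  induction q generalizing seen with
  | nil => simp [pvDk]
  | cons r q ih =>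
    simp only [pvDk]
    by_cases hr : r.1 ∈ seen
    · rw [if_pos hr]; exact (ih seen).cons r
    · rw [if_neg hr]; exact (ih (seen ++ [r.1])).cons₂ r

-- A's last_contracted list is a permutation of B's dict values
theorem pvValues_perm (q : List (Int × Int)) :
    ((pvDk [] q).map (·.2)).Perm (pvD q).values := by
  have hitems : (pvD q).items = ((pvD q).keys).map (fun k => (k, (pvD q).getD k 0)) :=
    PySem.Dict.items_eq_map_keys _ (pvD_nodup q) 0
  have hkeysperm : ((pvD q).keys).Perm ((pvDk [] q).map (·.1)) := by
    rw [List.perm_ext_iff_of_nodup (pvD_nodup q) (pvDk_nodup [] q)]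
    intro k
    rw [pvD_mem_keys, pvDk_mem_keys]
    simp
  have hrebuild : ((pvDk [] q).map (·.1)).map (fun k => (k, (pvD q).getD k 0)) = pvDk [] q := by
    rw [List.map_map]
    have : ∀ p ∈ pvDk [] q, ((fun k => (k, (pvD q).getD k 0)) ∘ (·.1)) p = id p := by
      intro p hp
      have hfind := pvDk_find? [] q p hp
      have hget : (pvD q).get? p.1 = some p.2 := by
        rw [pvD_get?, hfind]; rfl
      have := PySem.Dict.getD_of_get?_eq_some (pvD q) 0 hget
      simp [this]
    rw [List.map_congr_left this, List.map_id]
  have hip : (pvD q).items.Perm (pvDk [] q) := by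
    rw [hitems, ← hrebuild]
    exact hkeysperm.map _
  have : ((pvD q).items.map (·.2)).Perm ((pvDk [] q).map (·.2)) := hip.map _
  exact (this.symm)

theorem pvContracted_eq (q : List (Int × Int)) (hq : q.Pairwise (fun x y => y.2 < x.2)) :
    PySem.List.sorted (pvD q).values (fun x => x) true = (pvDk [] q).map (·.2) := by
  refine PySem.List.sorted_rev_eq_of_perm_of_pairwise_gt _ _ _ (pvValues_perm q) ?_
  have hdk : (pvDk [] q).Pairwise (fun x y => y.2 < x.2) :=
    hq.sublist (pvDk_sublist [] q)
  exact List.pairwise_map.mpr hdk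

-- bo[0] (total form used by both ports) is headI
theorem pvGet0_headI (l : List Int) : (PySem.List.pyGet? l 0).getD 0 = l.headI := by
  cases l <;> simp [PySem.List.pyGet?, PySem.List.pyIdx?]


-- A's uncontracted accumulator equals B's descending-range comprehension
theorem pvUnc (bl : List (List Int)) :
    List.map (fun x => x.1) (List.filter pvP (PySem.List.enumerate bl).reverse) =
    (PySem.List.pyRange ((bl.length : Int) - 1) (-1) (-1)).filter
      (fun i => ((PySem.List.pyGet? bl i).getD []).length == 2) := by
  rw [List.filter_reverse, List.map_reverse, PySem.List.pyRange_neg_one_eq_reverse,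
    List.filter_reverse]
  congr 1
  have e1 : (-1 : Int) + 1 = 0 := by norm_num
  have e2 : ((bl.length : Int) - 1) + 1 = (bl.length : Int) := by ring
  rw [e1, e2]
  rw [PySem.List.enumerate_eq_map_pyRange bl ([] : List Int), List.filter_map, List.map_map]
  have hc : ∀ i ∈ PySem.List.pyRange 0 (PySem.List.len bl) 1,
      (pvP ∘ fun j => (j, PySem.List.pyGetD bl j [])) i =
        (((PySem.List.pyGet? bl i).getD []).length == 2) := by
    intro i _; simp [pvP, PySem.List.pyGetD]
  rw [List.filter_congr hc]
  have h2 : ∀ p ∈ (PySem.List.pyRange 0 (PySem.List.len bl) 1).filter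
      (fun i => ((PySem.List.pyGet? bl i).getD []).length == 2),
      ((fun x => x.1) ∘ fun j : Int => (j, PySem.List.pyGetD bl j [])) p = id p := by
    intro p _; rfl
  rw [List.map_congr_left h2, List.map_id]
  simp [PySem.List.len]

-- ===== VERDICT (by name: the statement is the Claim_ definition above) =====
theorem last_contracted_and_uncontracted_orbital_ids_spec : Claim_equal_last_contracted_and_uncontracted_orbital_ids := by
  intro basis_list _hdom hpre
  unfold Spec_last_contracted_and_uncontracted_orbital_ids
  unfold last_contracted_and_uncontracted_orbital_ids last_contracted_and_uncontracted_orbital_ids_alt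
  dsimp only
  set m := PySem.List.enumerate basis_list with hm
  have hokr : ∀ p ∈ m.reverse, p.2.length = 2 ∨ p.2 ≠ [] := by
    intro p hp
    obtain ⟨k, hk, rfl⟩ := (PySem.List.mem_enumerate_iff _ _ _).mp (List.mem_reverse.mp hp)
    exact hpre _ (List.getElem_mem hk)
  rw [pvA_decomp _ _ _ _ hokr]
  simp only [List.nil_append]
  rw [Prod.mk.injEq]
  refine ⟨?_, ?_⟩
  · -- last_contracted
    -- B's dict-comprehension fold is pvD of the reversed (momentum, id) pair list
    have hsame : (fun p : Int × List Int => p.2.length != 2) = pvC := by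
      funext p; simp [pvC, bne]
    have hfold : ((m.filter (fun p : Int × List Int => p.2.length != 2)).foldl
        (fun d p => d.insert ((PySem.List.pyGet? p.2 0).getD 0) p.1) PySem.Dict.empty)
        = pvD ((m.filter pvC).map pvToKV).reverse := by
      rw [hsame, pvD, List.foldr_reverse, List.foldl_map]
      congr 1
      funext d p
      simp [pvToKV, pvGet0_headI]
    have hql : (m.reverse.filter pvC).map pvToKV = ((m.filter pvC).map pvToKV).reverse := by
      rw [List.filter_reverse, List.map_reverse]
    have hpw : (((m.filter pvC).map pvToKV).reverse).Pairwise (fun x y => y.2 < x.2) := by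
      rw [List.pairwise_reverse]
      refine List.pairwise_map.mpr ?_
      refine List.Pairwise.filter _ ?_
      exact PySem.List.pairwise_lt_enumerate basis_list 0
    rw [hfold, pvContracted_eq _ hpw, hql]
  · -- uncontracted
    exact pvUnc basis_list
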